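-- pv_equiv track=rewrite | github.com/PowerBarcoder/PowerBarcoder | main/poc/batchRunQcForLearnError.py | __count_distinct_values
-- ===== SOURCE A (Python) =====
-- def __count_distinct_values(batch_result_map_list):
--     """
--     Function to count distinct values for each key in a list of result maps
--     """
--     aggregated_counts = {}
--     for batch_result_map in batch_result_map_list:
--         for key, value in batch_result_map.items():
--             if key not in aggregated_counts:
--                 aggregated_counts[key] = set()
--             aggregated_counts[key].add(value)
--     return {key: len(values) for key, values in aggregated_counts.items()}
-- ===== SOURCE B (Python) =====
-- def __count_distinct_values(batch_result_map_list):
--     """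
--     Key-major two-phase version: first gather the distinct keys in first-seen
--     order, then for each key scan the maps and collect that key's values into
--     a set comprehension whose size is the answer.
--     """
--     keys = dict.fromkeys(k for m in batch_result_map_list for k in m)
--     return {k: len({m[k] for m in batch_result_map_list if k in m}) for k in keys}
-- ===== Notes on version B (the rewrite author's own statement) =====
-- stated objective: alternative
-- what changed: Replaces A's single pair-major pass accumulating a dict of per-key value-sets by a key-major two-phase algorithm: one pass collects the distinct keys in first-seen order, then each key is grouped-and-counted by its own scan over the maps with a set comprehension.
import Mathlib
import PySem

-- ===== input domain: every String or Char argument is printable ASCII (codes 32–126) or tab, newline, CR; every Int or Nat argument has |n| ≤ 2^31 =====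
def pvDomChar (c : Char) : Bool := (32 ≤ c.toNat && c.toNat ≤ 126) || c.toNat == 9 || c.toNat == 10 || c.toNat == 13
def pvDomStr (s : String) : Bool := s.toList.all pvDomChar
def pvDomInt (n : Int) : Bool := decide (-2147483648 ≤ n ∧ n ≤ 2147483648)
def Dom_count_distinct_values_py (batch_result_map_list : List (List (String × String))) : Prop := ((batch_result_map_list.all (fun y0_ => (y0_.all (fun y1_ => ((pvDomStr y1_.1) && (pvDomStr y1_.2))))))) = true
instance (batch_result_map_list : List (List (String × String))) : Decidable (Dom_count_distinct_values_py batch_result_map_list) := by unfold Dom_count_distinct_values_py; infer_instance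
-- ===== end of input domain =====

-- B replaces A's single pair-major pass accumulating a dict of per-key value-sets by a
-- key-major two-phase algorithm: gather the distinct keys first, then count each key's
-- distinct values by its own scan over the maps.

-- ===== PORT A =====
-- inner loop body of A: 'if key not in aggregated_counts: aggregated_counts[key] = set()'
-- then 'aggregated_counts[key].add(value)' (the .add on the stored set is Dict.modify)
def cdvStepA (agg : PySem.Dict String (PySem.Set String)) (kv : String × String) :
    PySem.Dict String (PySem.Set String) :=
  let agg := if agg.contains kv.1 then agg else agg.insert kv.1 PySem.Set.empty
  agg.modify kv.1 PySem.Set.empty (fun s => PySem.Set.add s kv.2)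

def count_distinct_values_py (batch_result_map_list : List (List (String × String))) : List (String × Int) :=
  let aggregated_counts :=
    batch_result_map_list.foldl
      (fun agg batch_result_map => (PySem.Dict.ofList batch_result_map).items.foldl cdvStepA agg)
      PySem.Dict.empty
  aggregated_counts.items.map (fun kv => (kv.1, PySem.Set.len kv.2))

-- ===== PORT B =====
-- one step of B's per-key scan '{m[k] for m in batch_result_map_list if k in m}';
-- 'm[k]' is guarded by 'k in m', so it is ported as getD with an unused default
def cdvStepB (k : String) (s : PySem.Set String) (m : List (String × String)) : PySem.Set String :=
  if (PySem.Dict.ofList m).contains k then PySem.Set.add s ((PySem.Dict.ofList m).getD k "") else s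

def count_distinct_values_py_alt (batch_result_map_list : List (List (String × String))) : List (String × Int) :=
  -- keys = dict.fromkeys(k for m in batch_result_map_list for k in m)
  let keys := PySem.List.dedup (batch_result_map_list.flatMap (fun m => (PySem.Dict.ofList m).keys))
  -- {k: len({m[k] for m in batch_result_map_list if k in m}) for k in keys}
  keys.map (fun k =>
    (k, PySem.Set.len (batch_result_map_list.foldl (cdvStepB k) PySem.Set.empty)))

-- ===== PRECONDITION & SPEC =====
def Spec_count_distinct_values_py (batch_result_map_list : List (List (String × String))) (out : List (String × Int)) : Prop := out = count_distinct_values_py_alt batch_result_map_list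
instance (batch_result_map_list : List (List (String × String))) (out : List (String × Int)) : Decidable (Spec_count_distinct_values_py batch_result_map_list out) := by unfold Spec_count_distinct_values_py; infer_instance

-- ===== CLAIM (what is proved, stated in full; the proofs are below) =====
def Claim_equal_count_distinct_values_py : Prop := ∀ (batch_result_map_list : List (List (String × String))), Dom_count_distinct_values_py batch_result_map_list → Spec_count_distinct_values_py batch_result_map_list (count_distinct_values_py batch_result_map_list)

-- ===== LEMMAS AND PROOFS =====

-- all (key, value) pairs seen by A, in A's traversal order
def cdvFlat (l : List (List (String × String))) : List (String × String) :=
  l.flatMap (fun m => (PySem.Dict.ofList m).items)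

-- the set of values a pair list P contributes to key k
def cdvVals (P : List (String × String)) (k : String) : PySem.Set String :=
  PySem.Set.ofList ((P.filter (fun p => p.1 == k)).map Prod.snd)

lemma cdv_ofList_append_singleton (xs : List String) (x : String) :
    PySem.Set.ofList (xs ++ [x]) = PySem.Set.add (PySem.Set.ofList xs) x := by
  simp [PySem.Set.ofList]

-- A's aggregation dict after folding a pair list P, characterised key-wise
lemma cdv_aggA (P : List (String × String)) :
    (P.foldl cdvStepA PySem.Dict.empty).keys = PySem.Set.ofList (P.map Prod.fst) ∧
    ∀ k, (P.foldl cdvStepA PySem.Dict.empty).getD k PySem.Set.empty = cdvVals P k := by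
  induction P using List.reverseRecOn with
  | nil =>
    refine ⟨by simp [PySem.Dict.keys_empty, PySem.Set.ofList, PySem.Set.empty], fun k => ?_⟩
    simp [PySem.Dict.getD_empty, cdvVals, PySem.Set.ofList, PySem.Set.empty]
  | append_singleton Q p ih =>
    obtain ⟨hk, hg⟩ := ih
    set agg := Q.foldl cdvStepA PySem.Dict.empty with hagg
    have hfold : (Q ++ [p]).foldl cdvStepA PySem.Dict.empty = cdvStepA agg p := by
      rw [List.foldl_append, List.foldl_cons, List.foldl_nil]
    have hvals : ∀ k, cdvVals (Q ++ [p]) k =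
        if k = p.1 then PySem.Set.add (cdvVals Q p.1) p.2 else cdvVals Q k := by
      intro k
      by_cases hkp : k = p.1
      · subst hkp
        simp [cdvVals, List.filter_append, cdv_ofList_append_singleton]
      · have : (p.1 == k) = false := by simp [Ne.symm hkp]
        simp [cdvVals, List.filter_append, this, hkp]
    rw [hfold]
    by_cases hc : agg.contains p.1 = true
    · have hstep : cdvStepA agg p = agg.modify p.1 PySem.Set.empty (fun s => PySem.Set.add s p.2) := by
        simp [cdvStepA, hc]
      have hmem : p.1 ∈ PySem.Set.ofList (Q.map Prod.fst) :=
        hk ▸ (PySem.Dict.contains_iff_mem_keys agg p.1).1 hc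
      constructor
      · rw [hstep, PySem.Dict.keys_modify, PySem.Dict.keys_insert_of_contains _ _ hc, hk,
          List.map_append, List.map_singleton, cdv_ofList_append_singleton,
          PySem.Set.add_of_mem hmem]
      · intro k
        rw [hstep, PySem.Dict.getD_modify, hvals k]
        split_ifs with hkp
        · rw [hg p.1]
        · exact hg k
    · have hc' : agg.contains p.1 = false := by simpa using hc
      have hstep : cdvStepA agg p =
          (agg.insert p.1 PySem.Set.empty).modify p.1 PySem.Set.empty (fun s => PySem.Set.add s p.2) := by
        simp [cdvStepA, hc']
      have hnmem : p.1 ∉ PySem.Set.ofList (Q.map Prod.fst) := fun hm =>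
        hc ((PySem.Dict.contains_iff_mem_keys agg p.1).2 (hk ▸ hm))
      have hQempty : cdvVals Q p.1 = PySem.Set.empty := by
        have hnm : p.1 ∉ Q.map Prod.fst := fun h => hnmem ((PySem.Set.mem_ofList _ _).2 h)
        have : Q.filter (fun q => q.1 == p.1) = [] := by
          refine List.filter_eq_nil_iff.2 (fun q hq => ?_)
          simp only [beq_iff_eq]
          exact fun h => hnm (List.mem_map.2 ⟨q, hq, h⟩)
        simp [cdvVals, this, PySem.Set.ofList, PySem.Set.empty]
      constructor
      · rw [hstep, PySem.Dict.keys_modify,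
          PySem.Dict.keys_insert_of_contains _ _ (PySem.Dict.contains_insert_self agg p.1 _),
          PySem.Dict.keys_insert_of_not_contains _ _ hc', hk,
          List.map_append, List.map_singleton, cdv_ofList_append_singleton,
          PySem.Set.add_of_not_mem hnmem]
      · intro k
        rw [hstep, PySem.Dict.getD_modify, hvals k]
        split_ifs with hkp
        · subst hkp
          rw [PySem.Dict.getD_insert, if_pos rfl, hQempty]
        · rw [PySem.Dict.getD_insert, if_neg hkp, hg k]

-- for a pair list with distinct keys (a dict's items), filtering by one key
-- yields exactly that key's stored value, or nothing
lemma cdv_filter_key (ps : List (String × String)) (hnd : (ps.map Prod.fst).Nodup) (k : String) :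
    ((ps.filter (fun p => p.1 == k)).map Prod.snd) =
      if (PySem.Dict.mk ps).contains k
      then [(PySem.Dict.mk ps).getD k ""] else [] := by
  induction ps with
  | nil => simp [PySem.Dict.contains]
  | cons q ps ih =>
    have hnd' : (ps.map Prod.fst).Nodup := (List.nodup_cons.1 (by simpa using hnd)).2
    have hhead : q.1 ∉ ps.map Prod.fst := (List.nodup_cons.1 (by simpa using hnd)).1
    by_cases hq : q.1 = k
    · have hfilter : ps.filter (fun p => p.1 == k) = [] := by
        refine List.filter_eq_nil_iff.2 (fun p hp => ?_)
        simp only [beq_iff_eq]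
        exact fun h => hhead (hq ▸ h ▸ List.mem_map.2 ⟨p, hp, rfl⟩)
      have hcont : (PySem.Dict.mk (q :: ps)).contains k = true := by
        simp [PySem.Dict.contains, hq]
      have hget : (PySem.Dict.mk (q :: ps)).getD k "" = q.2 := by
        simp [PySem.Dict.getD, PySem.Dict.get?, List.find?, hq]
      simp [hq, hfilter, hcont, hget]
    · have hq' : (q.1 == k) = false := by simpa using hq
      have hcont : (PySem.Dict.mk (q :: ps)).contains k = (PySem.Dict.mk ps).contains k := by
        simp [PySem.Dict.contains, hq']
      have hget : (PySem.Dict.mk (q :: ps)).getD k "" = (PySem.Dict.mk ps).getD k "" := by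
        simp [PySem.Dict.getD, PySem.Dict.get?, List.find?, hq']
      rw [List.filter_cons, if_neg (by simp [hq']), ih hnd', hcont, hget]

-- B's per-key scan over the maps collects exactly the flat pair list's values for k
lemma cdv_foldB (k : String) (l : List (List (String × String))) (s : PySem.Set String) :
    l.foldl (cdvStepB k) s =
      PySem.Set.update s (((cdvFlat l).filter (fun p => p.1 == k)).map Prod.snd) := by
  induction l generalizing s with
  | nil => simp [cdvFlat, PySem.Set.update]
  | cons m l ih =>
    have hnd : ((PySem.Dict.ofList m).items.map Prod.fst).Nodup := by
      have := PySem.Dict.nodup_keys_ofList m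
      simpa [PySem.Dict.keys] using this
    have hfk := cdv_filter_key (PySem.Dict.ofList m).items hnd k
    have hflat : cdvFlat (m :: l) = (PySem.Dict.ofList m).items ++ cdvFlat l := by
      simp [cdvFlat]
    rw [List.foldl_cons, ih, hflat, List.filter_append, List.map_append, hfk]
    by_cases hc : (PySem.Dict.ofList m).contains k = true
    · rw [if_pos hc]
      simp [cdvStepB, hc, PySem.Set.update, PySem.Set.add]
    · rw [if_neg hc]
      simp [cdvStepB, hc]

-- ===== VERDICT (by name: the statement is the Claim_ definition above) =====
theorem count_distinct_values_py_spec : Claim_equal_count_distinct_values_py := by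
  intro l _
  unfold Spec_count_distinct_values_py count_distinct_values_py count_distinct_values_py_alt
  -- A's nested fold is the fold over the flat pair list
  have hAfold : l.foldl
      (fun agg m => (PySem.Dict.ofList m).items.foldl cdvStepA agg) PySem.Dict.empty =
      (cdvFlat l).foldl cdvStepA PySem.Dict.empty := by
    rw [cdvFlat, List.foldl_flatMap]
  obtain ⟨hk, hg⟩ := cdv_aggA (cdvFlat l)
  have hnd : ((cdvFlat l).foldl cdvStepA PySem.Dict.empty).keys.Nodup := by
    rw [hk]; exact PySem.Set.nodup_ofList _
  -- B's key list is A's key list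
  have hkeys : PySem.List.dedup (l.flatMap (fun m => (PySem.Dict.ofList m).keys)) =
      PySem.Set.ofList ((cdvFlat l).map Prod.fst) := by
    rw [PySem.List.dedup_eq_ofList, cdvFlat, List.map_flatMap]
    rfl
  simp only [hAfold]
  rw [PySem.Dict.items_eq_map_keys _ hnd PySem.Set.empty, List.map_map, hk, hkeys]
  refine List.map_congr_left (fun k _ => ?_)
  rw [Function.comp_apply, hg k, cdv_foldB k l PySem.Set.empty]
  rfl
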